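-- pv_equiv track=rewrite | github.com/Timmy009/pythonProject1 | morning_code/task2.py | turple_gen
-- ===== SOURCE A (Python) =====
-- def turple_gen(list2):
--     male_count = 0
--     female_count = 0
--     for index, name in enumerate(list2):
--         if list2[index].lower() == "male":
--             male_count += 1
--         else:
--             female_count += 1
--
--     tur = [(list2[0], male_count), (list2[1], female_count)]
--     return tur
-- ===== SOURCE B (Python) =====
-- def turple_gen(list2):
--     tally = {}
--     for name in list2:
--         k = name.lower()
--         tally[k] = tally.get(k, 0) + 1
--     male_count = tally.get("male", 0)
--     female_count = sum(v for k, v in tally.items() if k != "male")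
--     tur = [(list2[0], male_count), (list2[1], female_count)]
--     return tur
-- ===== Notes on version B (the rewrite author's own statement) =====
-- stated objective: alternative
-- what changed: B builds a frequency table (dict keyed by the lowered name) in one pass, reads the male count from the 'male' entry, and sums the remaining table entries for the female count, instead of A's two counters incremented in an if/else inside an enumerate loop.
import Mathlib
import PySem

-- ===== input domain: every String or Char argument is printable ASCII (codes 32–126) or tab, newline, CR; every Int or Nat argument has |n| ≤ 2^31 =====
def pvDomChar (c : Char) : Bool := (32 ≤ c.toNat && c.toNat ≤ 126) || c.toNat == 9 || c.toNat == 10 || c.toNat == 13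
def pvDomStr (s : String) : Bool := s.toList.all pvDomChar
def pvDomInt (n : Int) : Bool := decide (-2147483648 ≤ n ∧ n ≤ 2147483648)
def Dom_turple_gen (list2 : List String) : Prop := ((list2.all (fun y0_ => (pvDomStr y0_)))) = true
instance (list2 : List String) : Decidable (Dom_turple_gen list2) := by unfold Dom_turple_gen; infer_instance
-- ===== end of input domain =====

-- B replaces A's dual if/else counters by a frequency table of lowered names: male is read from
-- the table, female is the sum of all other table entries (an alternative of the same O(n) cost).

-- ===== PORT A =====
-- A: loop over enumerate(list2), two counters incremented in an if/else, then build the pair list.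
def turple_gen (list2 : List String) : List (String × Int) :=
  let mf := list2.foldl
    (fun (acc : Int × Int) name =>
      if PySem.Str.lower name == "male" then (acc.1 + 1, acc.2) else (acc.1, acc.2 + 1))
    (0, 0)
  match PySem.List.pyGet? list2 0, PySem.List.pyGet? list2 1 with
  | some a, some b => [(a, mf.1), (b, mf.2)]
  | _, _ => []  -- unreachable under Pre_ (Python raises IndexError)

-- ===== PORT B =====
-- B: tally[name.lower()] += 1 over the list; male = tally.get("male", 0);
--    female = sum of tally values whose key is not "male".
def turple_gen_alt (list2 : List String) : List (String × Int) :=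
  let tally := list2.foldl
    (fun (d : PySem.Dict String Int) name =>
      let k := PySem.Str.lower name
      d.insert k (d.getD k 0 + 1))
    PySem.Dict.empty
  let male : Int := tally.getD "male" 0
  let female : Int := tally.items.foldl
    (fun (s : Int) kv => if kv.1 ≠ "male" then s + kv.2 else s) 0
  match PySem.List.pyGet? list2 0 with
  | none => []  -- unreachable under Pre_ (Python raises IndexError)
  | some a =>
    match PySem.List.pyGet? list2 1 with
    | none => []  -- unreachable under Pre_ (Python raises IndexError)
    | some b => [(a, male), (b, female)]

-- ===== PRECONDITION & SPEC =====
-- Pre_ excludes lists with fewer than two elements, on which both Pythons raise IndexError at list2[0]/list2[1].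
def Pre_turple_gen (list2 : List String) : Prop := 2 ≤ list2.length
instance (list2 : List String) : Decidable (Pre_turple_gen list2) := by unfold Pre_turple_gen; infer_instance
def pvWitness_turple_gen : List String := ["Male", "female", "x"]
def Spec_turple_gen (list2 : List String) (out : List (String × Int)) : Prop := out = turple_gen_alt list2
instance (list2 : List String) (out : List (String × Int)) : Decidable (Spec_turple_gen list2 out) := by unfold Spec_turple_gen; infer_instance

-- ===== CLAIM (what is proved, stated in full; the proofs are below) =====
def Claim_equal_turple_gen : Prop := ∀ (list2 : List String), Dom_turple_gen list2 → Pre_turple_gen list2 → Spec_turple_gen list2 (turple_gen list2)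

-- ===== LEMMAS AND PROOFS =====

-- A's dual-counter fold, characterised from any start: males added to .1, non-males to .2.
theorem foldA_char (l : List String) (m f : Int) :
    l.foldl (fun (acc : Int × Int) name =>
      if PySem.Str.lower name == "male" then (acc.1 + 1, acc.2) else (acc.1, acc.2 + 1)) (m, f)
    = (m + (l.countP (fun n => PySem.Str.lower n == "male") : Int),
       f + ((l.length : Int) - (l.countP (fun n => PySem.Str.lower n == "male") : Int))) := by
  induction l generalizing m f with
  | nil => simp
  | cons h t ih =>
    simp only [List.foldl_cons, List.countP_cons, List.length_cons]
    by_cases hp : PySem.Str.lower h == "male"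
    · rw [if_pos hp, ih, Prod.mk.injEq]
      constructor <;> (push_cast [hp]; simp only [if_true]; ring)
    · rw [if_neg hp, ih, Prod.mk.injEq]
      constructor <;> (push_cast [hp]; ring)

-- B's tally-building fold is Counter(map lower list2).
theorem tally_eq_counter (l : List String) :
    l.foldl
      (fun (d : PySem.Dict String Int) name =>
        let k := PySem.Str.lower name
        d.insert k (d.getD k 0 + 1))
      PySem.Dict.empty
    = PySem.Dict.counter (l.map PySem.Str.lower) := by
  rw [← PySem.Dict.foldl_insert_getD_add_one_eq_counter, List.foldl_map]

-- The filtered-sum fold over a pair list, as a sum of a map.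
theorem fold_ite_sum (l : List (String × Int)) (s : Int) :
    l.foldl (fun (s : Int) kv => if kv.1 ≠ "male" then s + kv.2 else s) s
    = s + (l.map (fun kv => if kv.1 ≠ "male" then kv.2 else 0)).sum := by
  induction l generalizing s with
  | nil => simp
  | cons h t ih =>
    simp only [List.foldl_cons, List.map_cons, List.sum_cons]
    by_cases hp : h.1 ≠ "male"
    · rw [if_pos hp, if_pos hp, ih]; ring
    · rw [if_neg hp, if_neg hp, ih]; ring

-- PySem's first-occurrence dedup has the same Finset of elements as the list.
theorem toFinset_pydedup (l : List String) :
    (PySem.List.dedup l).toFinset = l.toFinset := by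
  apply Finset.ext
  intro x
  simp [PySem.List.mem_dedup]

-- Summing the non-"male" counts over the distinct lowered names gives length − count "male".
theorem sum_nonmale_counts (L : List String) :
    ((PySem.List.dedup L).map (fun k => if k ≠ "male" then (L.count k : Int) else 0)).sum
    = (L.length : Int) - (L.count "male" : Int) := by
  rw [← List.sum_toFinset _ (PySem.List.nodup_dedup L), toFinset_pydedup]
  have hsplit : ∀ k : String,
      (if k ≠ "male" then (L.count k : Int) else 0)
      = (L.count k : Int) - (if k = "male" then (L.count k : Int) else 0) := by
    intro k; by_cases hk : k = "male" <;> simp [hk]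
  rw [Finset.sum_congr rfl (fun k _ => hsplit k), Finset.sum_sub_distrib]
  rw [Finset.sum_ite_eq' L.toFinset "male" (fun k => (L.count k : Int))]
  have hlen : ∑ k ∈ L.toFinset, (L.count k : Int) = (L.length : Int) := by
    rw [← Nat.cast_sum]
    norm_cast
    exact List.sum_toFinset_count_eq_length L
  rw [hlen]
  by_cases hm : "male" ∈ L.toFinset
  · simp [hm]
  · have : L.count "male" = 0 := by
      rw [List.count_eq_zero]; simpa [List.mem_toFinset] using hm
    simp [hm, this]

-- countP over the original list equals count "male" over the lowered list.
theorem countP_lower (l : List String) :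
    l.countP (fun n => PySem.Str.lower n == "male") = (l.map PySem.Str.lower).count "male" := by
  rw [List.count_eq_countP, List.countP_map]
  rfl

-- ===== VERDICT (by name: the statement is the Claim_ definition above) =====
theorem turple_gen_spec : Claim_equal_turple_gen := by
  intro list2 _ _
  unfold Spec_turple_gen turple_gen turple_gen_alt
  simp only [tally_eq_counter, PySem.Dict.getD_counter, PySem.Dict.items_counter,
    foldA_char, fold_ite_sum, zero_add, List.map_map]
  have hmap : ((PySem.Set.ofList (list2.map PySem.Str.lower)).map
      ((fun kv : String × Int => if kv.1 ≠ "male" then kv.2 else 0) ∘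
        fun k => (k, ((list2.map PySem.Str.lower).count k : Int))))
      = (PySem.List.dedup (list2.map PySem.Str.lower)).map
          (fun k => if k ≠ "male" then ((list2.map PySem.Str.lower).count k : Int) else 0) := by
    rw [← PySem.List.dedup_eq_ofList]
    rfl
  rw [hmap, sum_nonmale_counts, countP_lower]
  cases PySem.List.pyGet? list2 0 <;> cases PySem.List.pyGet? list2 1 <;>
    simp [List.length_map]
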